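-- pv_equiv track=rewrite | github.com/HumanoidAgents/HumanoidAgents | humanoidagents/generative_agent.py | postprocess_initial_plan
-- ===== SOURCE A (Python) =====
-- def postprocess_initial_plan(plan):
--     # remove prepended or trailing whitespace (including newlines)
--     plan = plan.strip()
--
--     # remove empty lines
--     plan_list = plan.split('\n')
--     plan = '\n'.join([plan_item for plan_item in plan_list if len(plan_item.strip())])
--
--     # use ending time instead of time interval 07:00 am - 07:15 am
--     plan_list = plan.split('\n')
--     new_plan_list = []
--     for plan_item in plan_list:
--         # if there exists a hyphen (likely 07:00 am - 07:15 am) and three colons (i.e. 2 in time and 1 demarcating start of activity - splitting into 4 components), very likely to be time interval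
--         if len(plan_item.split("-")) > 1 and len(plan_item.split(":")) > 3:
--             new_plan_list.append(plan_item.split("-", 1)[1].strip())
--         else:
--             new_plan_list.append(plan_item)
--
--     plan = '\n'.join(new_plan_list)
--
--     # insert prepended 0 for situations like 7:15am instead of 07:15am
--     plan_list = plan.split('\n')
--     new_plan_list = []
--     for plan_item in plan_list:
--         if len(plan_item.split(":")[0]) < 2:
--             new_plan_list.append("0"+plan_item)
--         else:
--             new_plan_list.append(plan_item)
--     plan = '\n'.join(new_plan_list)
--
--     # remove lines not starting with time
--     plan = '\n'.join([plan_item for plan_item in plan.split('\n') if len(plan_item.split(":")[0]) == 2])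
--
--     # lowercase first character of activity as well as PM/AM if exists
--     plan_list = plan.split('\n')
--     new_plan_list = []
--     for plan_item in plan_list:
--         if len(plan_item) > 11:
--             new_plan_list.append(plan_item[:11].lower() + plan_item[11:])
--         else:
--             new_plan_list.append(plan_item)
--
--     plan = '\n'.join(new_plan_list)
--     return plan
-- ===== SOURCE B (Python) =====
-- def _strip_interval(line):
--     # "07:00 am - 07:15 am: x" -> keep only the part after the first hyphen
--     if len(line.split('-')) > 1 and len(line.split(':')) > 3:
--         return line.split('-', 1)[1].strip()
--     return line
--
--
-- def _zero_pad(line):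
--     # "7:15 am ..." -> "07:15 am ..."
--     return '0' + line if len(line.split(':')[0]) < 2 else line
--
--
-- def _lower11(line):
--     # lowercase the time prefix "HH:MM am - "
--     return line[:11].lower() + line[11:] if len(line) > 11 else line
--
--
-- def _process_line(line):
--     # None = drop the line, str = keep it (steps in the original order)
--     if not line.strip():
--         return None
--     line = _zero_pad(_strip_interval(line))
--     if len(line.split(':')[0]) != 2:
--         return None
--     return _lower11(line)
--
--
-- def postprocess_initial_plan(plan):
--     out = []
--     for line in plan.strip().split('\n'):
--         processed = _process_line(line)
--         if processed is not None:
--             out.append(processed)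
--     return '\n'.join(out)
-- ===== Notes on version B (the rewrite author's own statement) =====
-- stated objective: simpler
-- what changed: A rebuilds the whole text five times (join the lines, re-split, transform, re-join for each cleanup step); B splits once and applies the per-line steps in the original order in a single pass, joining the kept lines once at the end.
import Mathlib
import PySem

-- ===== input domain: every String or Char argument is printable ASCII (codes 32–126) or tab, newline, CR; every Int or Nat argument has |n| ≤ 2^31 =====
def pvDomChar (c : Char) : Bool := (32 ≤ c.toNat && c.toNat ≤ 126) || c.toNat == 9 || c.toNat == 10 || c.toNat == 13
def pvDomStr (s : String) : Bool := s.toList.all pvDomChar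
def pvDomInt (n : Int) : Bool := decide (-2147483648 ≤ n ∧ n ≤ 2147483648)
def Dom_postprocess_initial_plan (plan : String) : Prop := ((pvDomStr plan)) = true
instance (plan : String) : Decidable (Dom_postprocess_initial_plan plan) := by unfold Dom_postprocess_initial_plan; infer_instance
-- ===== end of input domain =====

-- B reformats the plan in ONE pass over its lines (per-line steps in A's order, kept lines joined once)
-- instead of A's five whole-text join/split passes; objective: simpler.

-- ===== PORT A =====
def postprocess_initial_plan (plan : String) : String :=
  let plan := PySem.Str.strip plan
  let plan_list := (PySem.Str.split? plan "\n").getD []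
  let plan := PySem.Str.join "\n" (plan_list.filter (fun l => decide (PySem.Str.len (PySem.Str.strip l) ≠ 0)))
  let plan_list2 := (PySem.Str.split? plan "\n").getD []
  let new_plan_list2 := plan_list2.map (fun l =>
    if ((PySem.Str.split? l "-").getD []).length > 1 ∧ ((PySem.Str.split? l ":").getD []).length > 3 then
      PySem.Str.strip ((PySem.List.pyGet? ((PySem.Str.splitMax? l "-" 1).getD []) 1).getD "")
    else l)
  let plan := PySem.Str.join "\n" new_plan_list2
  let plan_list3 := (PySem.Str.split? plan "\n").getD []
  let new_plan_list3 := plan_list3.map (fun l =>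
    if PySem.Str.len (((PySem.Str.split? l ":").getD []).headD "") < 2 then "0" ++ l else l)
  let plan := PySem.Str.join "\n" new_plan_list3
  let plan := PySem.Str.join "\n" (((PySem.Str.split? plan "\n").getD []).filter
    (fun l => decide (PySem.Str.len (((PySem.Str.split? l ":").getD []).headD "") = 2)))
  let plan_list4 := (PySem.Str.split? plan "\n").getD []
  let new_plan_list4 := plan_list4.map (fun l =>
    if PySem.Str.len l > 11 then
      PySem.Str.lower (PySem.Str.slice l none (some 11)) ++ PySem.Str.slice l (some 11) none
    else l)
  PySem.Str.join "\n" new_plan_list4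

-- ===== PORT B ===== (helpers mirror Source B's helpers)
def pvStripInterval (line : String) : String :=
  if ((PySem.Str.split? line "-").getD []).length > 1 ∧ ((PySem.Str.split? line ":").getD []).length > 3 then
    PySem.Str.strip ((PySem.List.pyGet? ((PySem.Str.splitMax? line "-" 1).getD []) 1).getD "")
  else line

def pvZeroPad (line : String) : String :=
  if PySem.Str.len (((PySem.Str.split? line ":").getD []).headD "") < 2 then "0" ++ line else line

def pvLower11 (line : String) : String :=
  if PySem.Str.len line > 11 then
    PySem.Str.lower (PySem.Str.slice line none (some 11)) ++ PySem.Str.slice line (some 11) none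
  else line

def pvProcessLine (line : String) : Option String :=
  if PySem.Str.len (PySem.Str.strip line) = 0 then none
  else
    let line := pvZeroPad (pvStripInterval line)
    if PySem.Str.len (((PySem.Str.split? line ":").getD []).headD "") ≠ 2 then none
    else some (pvLower11 line)

def postprocess_initial_plan_alt (plan : String) : String :=
  let lines := (PySem.Str.split? (PySem.Str.strip plan) "\n").getD []
  PySem.Str.join "\n" (lines.foldl (fun out line =>
    match pvProcessLine line with
    | some x => out ++ [x]
    | none => out) [])


-- ===== PRECONDITION & SPEC =====
def Spec_postprocess_initial_plan (plan : String) (out : String) : Prop := out = postprocess_initial_plan_alt plan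
instance (plan : String) (out : String) : Decidable (Spec_postprocess_initial_plan plan out) := by unfold Spec_postprocess_initial_plan; infer_instance

-- ===== CLAIM (what is proved, stated in full; the proofs are below) =====
def Claim_equal_postprocess_initial_plan : Prop := ∀ (plan : String), Dom_postprocess_initial_plan plan → Spec_postprocess_initial_plan plan (postprocess_initial_plan plan)

-- ===== LEMMAS AND PROOFS =====

-- proof-side names for A's inline filter lambdas
def pvBlank (l : String) : Bool := decide (PySem.Str.len (PySem.Str.strip l) ≠ 0)
def pvTime (l : String) : Bool := decide (PySem.Str.len (((PySem.Str.split? l ":").getD []).headD "") = 2)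
def pvSPL (s : String) : List String := (PySem.Str.split? s "\n").getD []

theorem portA_eq (plan : String) : postprocess_initial_plan plan =
    PySem.Str.join "\n" (List.map pvLower11 (pvSPL (PySem.Str.join "\n" (List.filter pvTime (pvSPL (PySem.Str.join "\n" (List.map pvZeroPad (pvSPL (PySem.Str.join "\n" (List.map pvStripInterval (pvSPL (PySem.Str.join "\n" (List.filter pvBlank (pvSPL (PySem.Str.strip plan)))))))))))))))
    := rfl

theorem pvFoldl_filterMap (f : String → Option String) :
    ∀ (L : List String) (acc : List String),
      L.foldl (fun out line => match f line with | some x => out ++ [x] | none => out) acc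
        = acc ++ L.filterMap f := by
  intro L
  induction L with
  | nil => intro acc; simp
  | cons a t ih =>
    intro acc
    cases h : f a <;> simp [List.foldl_cons, h, ih]

theorem portB_eq (plan : String) : postprocess_initial_plan_alt plan =
    PySem.Str.join "\n" (List.filterMap pvProcessLine (pvSPL (PySem.Str.strip plan))) := by
  simp only [postprocess_initial_plan_alt]
  rw [pvFoldl_filterMap]
  rw [List.nil_append]
  rfl

theorem pvLine_eq (l : String) : pvProcessLine l =
    if pvBlank l then
      (if pvTime (pvZeroPad (pvStripInterval l)) then some (pvLower11 (pvZeroPad (pvStripInterval l))) else none)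
    else none := by
  unfold pvProcessLine
  by_cases h0 : PySem.Str.len (PySem.Str.strip l) = 0
  · have hb : pvBlank l = false := by unfold pvBlank; exact decide_eq_false (not_not_intro h0)
    rw [if_pos h0, hb]
    simp
  · have hb : pvBlank l = true := by unfold pvBlank; exact decide_eq_true h0
    rw [if_neg h0, hb, if_pos rfl]
    by_cases h2 : PySem.Str.len (((PySem.Str.split? (pvZeroPad (pvStripInterval l)) ":").getD []).headD "") = 2
    · have ht : pvTime (pvZeroPad (pvStripInterval l)) = true := by unfold pvTime; exact decide_eq_true h2
      rw [ht, if_neg (not_not_intro h2), if_pos rfl]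
    · have ht : pvTime (pvZeroPad (pvStripInterval l)) = false := by unfold pvTime; exact decide_eq_false h2
      rw [ht, if_pos h2]
      simp

theorem pvFusion : ∀ (L : List String),
    List.filterMap pvProcessLine L
      = List.map pvLower11 (List.filter pvTime (List.map pvZeroPad (List.map pvStripInterval (List.filter pvBlank L)))) := by
  intro L
  induction L with
  | nil => rfl
  | cons a t ih =>
    rw [List.filterMap_cons, pvLine_eq a, List.filter_cons]
    by_cases hb : pvBlank a
    · rw [if_pos hb, if_pos hb, List.map_cons, List.map_cons, List.filter_cons]
      by_cases ht : pvTime (pvZeroPad (pvStripInterval a))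
      · rw [if_pos ht, if_pos ht, List.map_cons, ih]
      · rw [if_neg ht, if_neg ht, ih]
    · rw [if_neg hb, if_neg hb, ih]

theorem pvGo_last : ∀ (a : List Char) (fuel : Nat) (cur : List Char) (acc : List (List Char)),
    '\n' ∉ a → a.length < fuel →
    PySem.Chars.splitOn.go ['\n'] fuel a cur acc = acc.reverse ++ [cur.reverse ++ a] := by
  intro a
  induction a with
  | nil =>
    intro fuel cur acc _ hf
    cases fuel with
    | zero => omega
    | succ f => simp [PySem.Chars.splitOn.go]
  | cons c rest ih =>
    intro fuel cur acc hnl hf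
    cases fuel with
    | zero => simp at hf
    | succ f =>
      simp only [List.mem_cons, not_or] at hnl
      have hc : ¬ (['\n'].isPrefixOf (c :: rest) = true) := by
        simp [List.isPrefixOf]
        intro hh
        exact absurd hh hnl.1
      rw [show PySem.Chars.splitOn.go ['\n'] (f + 1) (c :: rest) cur acc
          = if ['\n'].isPrefixOf (c :: rest) = true then
              PySem.Chars.splitOn.go ['\n'] f (List.drop 1 (c :: rest)) [] (cur.reverse :: acc)
            else PySem.Chars.splitOn.go ['\n'] f rest (c :: cur) acc from rfl]
      rw [if_neg hc]
      rw [ih f (c :: cur) acc hnl.2 (by simp at hf ⊢; omega)]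
      simp

theorem pvGo_consume : ∀ (a : List Char) (fuel : Nat) (r cur : List Char) (acc : List (List Char)),
    '\n' ∉ a →
    PySem.Chars.splitOn.go ['\n'] (a.length + (fuel + 1)) (a ++ '\n' :: r) cur acc
      = PySem.Chars.splitOn.go ['\n'] fuel r [] ((cur.reverse ++ a) :: acc) := by
  intro a
  induction a with
  | nil =>
    intro fuel r cur acc _
    simp only [List.length_nil, Nat.zero_add, List.nil_append]
    rw [show PySem.Chars.splitOn.go ['\n'] (fuel + 1) ('\n' :: r) cur acc
        = if ['\n'].isPrefixOf ('\n' :: r) = true then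
            PySem.Chars.splitOn.go ['\n'] fuel (List.drop 1 ('\n' :: r)) [] (cur.reverse :: acc)
          else PySem.Chars.splitOn.go ['\n'] fuel r ('\n' :: cur) acc from rfl]
    rw [if_pos (by simp [List.isPrefixOf])]
    simp
  | cons c rest ih =>
    intro fuel r cur acc hnl
    simp only [List.mem_cons, not_or] at hnl
    have hc : ¬ (['\n'].isPrefixOf (c :: (rest ++ '\n' :: r)) = true) := by
      simp [List.isPrefixOf]
      intro hh
      exact absurd hh hnl.1
    have hl : (c :: rest).length + (fuel + 1) = (rest.length + (fuel + 1)) + 1 := by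
      simp; omega
    rw [hl, List.cons_append]
    rw [show PySem.Chars.splitOn.go ['\n'] ((rest.length + (fuel + 1)) + 1) (c :: (rest ++ '\n' :: r)) cur acc
        = if ['\n'].isPrefixOf (c :: (rest ++ '\n' :: r)) = true then
            PySem.Chars.splitOn.go ['\n'] (rest.length + (fuel + 1)) (List.drop 1 (c :: (rest ++ '\n' :: r))) [] (cur.reverse :: acc)
          else PySem.Chars.splitOn.go ['\n'] (rest.length + (fuel + 1)) (rest ++ '\n' :: r) (c :: cur) acc from rfl]
    rw [if_neg hc]
    rw [ih fuel r (c :: cur) acc hnl.2]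
    simp

theorem pvJoin_go : ∀ (L : List (List Char)) (acc : List (List Char)) (extra : Nat),
    L ≠ [] → (∀ l ∈ L, '\n' ∉ l) →
    PySem.Chars.splitOn.go ['\n'] ((PySem.Chars.join ['\n'] L).length + 1 + extra)
        (PySem.Chars.join ['\n'] L) [] acc = acc.reverse ++ L := by
  intro L
  induction L with
  | nil => intro _ _ h; exact absurd rfl h
  | cons a t ih =>
    intro acc extra _ hf
    cases t with
    | nil =>
      rw [PySem.Chars.join_singleton]
      rw [pvGo_last a (a.length + 1 + extra) [] acc (hf a (by simp)) (by omega)]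
      simp
    | cons b t' =>
      rw [PySem.Chars.join_cons_cons]
      have harr : a ++ ['\n'] ++ PySem.Chars.join ['\n'] (b :: t') = a ++ '\n' :: PySem.Chars.join ['\n'] (b :: t') := by simp
      have hlen : (a ++ ['\n'] ++ PySem.Chars.join ['\n'] (b :: t')).length + 1 + extra
          = a.length + ((((PySem.Chars.join ['\n'] (b :: t')).length + 1 + extra)) + 1) := by
        simp
        omega
      rw [hlen, harr]
      rw [pvGo_consume a ((PySem.Chars.join ['\n'] (b :: t')).length + 1 + extra) _ [] acc (hf a (by simp))]
      rw [ih ((([] : List Char).reverse ++ a) :: acc) extra (by simp) (fun l hl => hf l (by simp [hl]))]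
      simp

theorem pvSplitOn_join (L : List (List Char)) (h : L ≠ []) (hf : ∀ l ∈ L, '\n' ∉ l) :
    PySem.Chars.splitOn (PySem.Chars.join ['\n'] L) ['\n'] = L := by
  unfold PySem.Chars.splitOn
  have := pvJoin_go L [] 0 h hf
  simpa using this

theorem pvGo_free : ∀ (fuel : Nat) (l cur : List Char) (acc : List (List Char)),
    l.length < fuel → (∀ x ∈ acc, '\n' ∉ x) → '\n' ∉ cur →
    ∀ p ∈ PySem.Chars.splitOn.go ['\n'] fuel l cur acc, '\n' ∉ p := by
  intro fuel
  induction fuel with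
  | zero => intro l _ _ h; omega
  | succ f ih =>
    intro l cur acc hlen hacc hcur p hp
    cases l with
    | nil =>
      simp [PySem.Chars.splitOn.go] at hp
      rcases hp with h | h
      · exact hacc p h
      · subst h; simpa using hcur
    | cons c rest =>
      rw [show PySem.Chars.splitOn.go ['\n'] (f + 1) (c :: rest) cur acc
          = if ['\n'].isPrefixOf (c :: rest) = true then
              PySem.Chars.splitOn.go ['\n'] f (List.drop 1 (c :: rest)) [] (cur.reverse :: acc)
            else PySem.Chars.splitOn.go ['\n'] f rest (c :: cur) acc from rfl] at hp
      by_cases hc : ['\n'].isPrefixOf (c :: rest) = true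
      · rw [if_pos hc] at hp
        refine ih _ [] (cur.reverse :: acc) (by simp at hlen ⊢; omega) ?_ (by simp) p hp
        intro x hx
        rcases List.mem_cons.mp hx with h | h
        · subst h; simpa using hcur
        · exact hacc x h
      · rw [if_neg hc] at hp
        have hcne : ¬ ('\n' = c) := by
          simp [List.isPrefixOf] at hc
          exact hc
        refine ih rest (c :: cur) acc (by simp at hlen ⊢; omega) hacc ?_ p hp
        simp only [List.mem_cons, not_or]
        exact ⟨hcne, hcur⟩

theorem pvSplitOn_free (s : List Char) : ∀ p ∈ PySem.Chars.splitOn s ['\n'], '\n' ∉ p := by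
  unfold PySem.Chars.splitOn
  exact pvGo_free (s.length + 1) s [] [] (by omega) (by simp) (by simp)

theorem pvGoMax_sub : ∀ (fuel : Nat) (m : Nat) (l cur : List Char) (acc : List (List Char)),
    ∀ p ∈ PySem.Chars.splitOnMax.go ['-'] fuel m l cur acc,
      ∀ c ∈ p, c ∈ l ∨ c ∈ cur ∨ ∃ x ∈ acc, c ∈ x := by
  intro fuel
  induction fuel with
  | zero =>
    intro m l cur acc p hp c hc
    simp [PySem.Chars.splitOnMax.go] at hp
    rcases hp with h | h
    · exact Or.inr (Or.inr ⟨p, h, hc⟩)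
    · subst h; simp at hc; tauto
  | succ f ih =>
    intro m l cur acc p hp c hc
    cases l with
    | nil =>
      simp [PySem.Chars.splitOnMax.go] at hp
      rcases hp with h | h
      · exact Or.inr (Or.inr ⟨p, h, hc⟩)
      · subst h; simp at hc; tauto
    | cons a rest =>
      rw [show PySem.Chars.splitOnMax.go ['-'] (f + 1) m (a :: rest) cur acc
          = if m = 0 then ((cur.reverse ++ (a :: rest)) :: acc).reverse
            else if ['-'].isPrefixOf (a :: rest) = true then
              PySem.Chars.splitOnMax.go ['-'] f (m - 1) (List.drop 1 (a :: rest)) [] (cur.reverse :: acc)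
            else PySem.Chars.splitOnMax.go ['-'] f m rest (a :: cur) acc from rfl] at hp
      by_cases hm : m = 0
      · rw [if_pos hm] at hp
        simp at hp
        rcases hp with h | h
        · exact Or.inr (Or.inr ⟨p, h, hc⟩)
        · subst h; simp at hc; simp only [List.mem_cons]; tauto
      · rw [if_neg hm] at hp
        by_cases hpre : ['-'].isPrefixOf (a :: rest) = true
        · rw [if_pos hpre] at hp
          have := ih (m - 1) (List.drop 1 (a :: rest)) [] (cur.reverse :: acc) p hp c hc
          simp at this
          rcases this with h | h | h
          · exact Or.inl (by simp [h])
          · exact Or.inr (Or.inl (by simpa using h))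
          · exact Or.inr (Or.inr h)
        · rw [if_neg hpre] at hp
          have := ih m rest (a :: cur) acc p hp c hc
          rcases this with h | h | h
          · exact Or.inl (by simp [h])
          · rcases List.mem_cons.mp h with h' | h'
            · exact Or.inl (by simp [h'])
            · exact Or.inr (Or.inl h')
          · exact Or.inr (Or.inr h)

theorem pvSplitOnMax_sub (s : List Char) :
    ∀ p ∈ PySem.Chars.splitOnMax s ['-'] 1, ∀ c ∈ p, c ∈ s := by
  unfold PySem.Chars.splitOnMax
  rw [if_neg (by omega)]
  intro p hp c hc
  have := pvGoMax_sub (s.length + 1) (Int.toNat 1) s [] [] p hp c hc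
  simpa using this

theorem pvStrip_sub (s : List Char) (c : Char) (h : c ∈ PySem.Chars.strip s) : c ∈ s := by
  unfold PySem.Chars.strip PySem.Chars.rstrip PySem.Chars.lstrip at h
  simp only [List.mem_reverse] at h
  have h1 := (List.dropWhile_sublist (l := (List.dropWhile PySem.Chars.isspace s).reverse)
    PySem.Chars.isspace).mem h
  simp only [List.mem_reverse] at h1
  exact (List.dropWhile_sublist (l := s) PySem.Chars.isspace).mem h1

theorem pvSPL_eq (s : String) :
    pvSPL s = List.map String.ofList (PySem.Chars.splitOn s.toList ['\n']) := rfl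

theorem pvMap_ofList_toList (L : List String) : (L.map String.toList).map String.ofList = L := by
  rw [List.map_map]
  have h : String.ofList ∘ String.toList = id := funext (fun s => String.ofList_toList)
  rw [h, List.map_id]

theorem pvSPL_join (L : List String) (hL : L ≠ []) (hf : ∀ l ∈ L, '\n' ∉ l.toList) :
    pvSPL (PySem.Str.join "\n" L) = L := by
  rw [pvSPL_eq, PySem.Str.toList_join]
  rw [show ("\n".toList : List Char) = ['\n'] from rfl]
  rw [pvSplitOn_join (L.map String.toList) (by simpa using hL)
    (by intro l hl; rcases List.mem_map.mp hl with ⟨x, hx, rfl⟩; exact hf x hx)]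
  exact pvMap_ofList_toList L

theorem pvSPL_free (s : String) : ∀ l ∈ pvSPL s, '\n' ∉ l.toList := by
  intro l hl
  rw [pvSPL_eq] at hl
  rcases List.mem_map.mp hl with ⟨p, hp, rfl⟩
  rw [String.toList_ofList]
  exact pvSplitOn_free s.toList p hp

theorem pvPyGet_mem {α : Type} (xs : List α) (i : Int) (a : α)
    (h : PySem.List.pyGet? xs i = some a) : a ∈ xs := by
  unfold PySem.List.pyGet? at h
  rcases Option.bind_eq_some_iff.mp h with ⟨k, _, hk⟩
  exact List.mem_of_getElem? hk

theorem pvStripInterval_free (l : String) (h : '\n' ∉ l.toList) : '\n' ∉ (pvStripInterval l).toList := by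
  unfold pvStripInterval
  split_ifs with hg
  · rw [PySem.Str.toList_strip]
    intro hmem
    have h1 := pvStrip_sub _ _ hmem
    cases hx : PySem.List.pyGet? ((PySem.Str.splitMax? l "-" 1).getD []) 1 with
    | none => rw [hx] at h1; simp at h1
    | some y =>
      rw [hx] at h1
      simp only [Option.getD_some] at h1
      have hy := pvPyGet_mem _ _ _ hx
      rw [show (PySem.Str.splitMax? l "-" 1).getD []
          = List.map String.ofList (PySem.Chars.splitOnMax l.toList ['-'] 1) from rfl] at hy
      rcases List.mem_map.mp hy with ⟨p, hp, rfl⟩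
      rw [String.toList_ofList] at h1
      exact h (pvSplitOnMax_sub l.toList p hp '\n' h1)
  · exact h

theorem pvZeroPad_free (l : String) (h : '\n' ∉ l.toList) : '\n' ∉ (pvZeroPad l).toList := by
  unfold pvZeroPad
  split_ifs
  · rw [String.toList_append]
    simp only [List.mem_append, not_or]
    exact ⟨by decide, h⟩
  · exact h

theorem pvMain (plan : String) :
    postprocess_initial_plan plan = postprocess_initial_plan_alt plan := by
  rw [portA_eq, portB_eq]
  have hfree0 := pvSPL_free (PySem.Str.strip plan)
  set L0 := pvSPL (PySem.Str.strip plan) with hL0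
  rw [pvFusion]
  by_cases hF : L0.filter pvBlank = []
  · rw [hF]
    decide
  · have hfreeF : ∀ l ∈ L0.filter pvBlank, '\n' ∉ l.toList :=
      fun l hl => hfree0 l (List.mem_of_mem_filter hl)
    rw [pvSPL_join _ hF hfreeF]
    have hM2 : (L0.filter pvBlank).map pvStripInterval ≠ [] := by
      simp only [ne_eq, List.map_eq_nil_iff]; exact hF
    have hfreeM2 : ∀ l ∈ (L0.filter pvBlank).map pvStripInterval, '\n' ∉ l.toList := by
      intro l hl
      rcases List.mem_map.mp hl with ⟨x, hx, rfl⟩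
      exact pvStripInterval_free x (hfreeF x hx)
    rw [pvSPL_join _ hM2 hfreeM2]
    have hM3 : ((L0.filter pvBlank).map pvStripInterval).map pvZeroPad ≠ [] := by
      simp only [ne_eq, List.map_eq_nil_iff]; exact hF
    have hfreeM3 : ∀ l ∈ ((L0.filter pvBlank).map pvStripInterval).map pvZeroPad, '\n' ∉ l.toList := by
      intro l hl
      rcases List.mem_map.mp hl with ⟨x, hx, rfl⟩
      exact pvZeroPad_free x (hfreeM2 x hx)
    rw [pvSPL_join _ hM3 hfreeM3]
    by_cases hM4 : (((L0.filter pvBlank).map pvStripInterval).map pvZeroPad).filter pvTime = []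
    · rw [hM4]
      decide
    · rw [pvSPL_join _ hM4 (fun l hl => hfreeM3 l (List.mem_of_mem_filter hl))]

-- ===== VERDICT (by name: the statement is the Claim_ definition above) =====
theorem postprocess_initial_plan_spec : Claim_equal_postprocess_initial_plan := by
  intro plan _
  unfold Spec_postprocess_initial_plan
  exact pvMain plan
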